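-- pv_equiv track=rewrite | github.com/fightnyy/programmers_algorithm | best_album.py | solution
-- ===== SOURCE A (Python) =====
-- import collections
--
-- def solution(genres, plays):
--     answer = []                               # 답 즉 index 적는곳
--     genre_dict = collections.defaultdict(int) # 어떤 음악 장르를 가장 많이 듣는지
--     music_num = collections.defaultdict(list) # 장르별로 가장 많이 듣는 음악이 뭔지
--
--     for index, s_g in enumerate(genres):
--         genre_dict[s_g] += plays[index]
--         music_num[s_g].append((index, plays[index]))
--     most_genre=collections.Counter(genre_dict)
--
--     for most,_ in most_genre.most_common(): # 가장 흔한 많이 나온 장르대로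
--         tmp_val = sorted(music_num[most], key = lambda x: (-x[1], x[0]))
--
--         if len(tmp_val) == 1:
--             answer.append(tmp_val[0][0])
--         else :
--             for i in range(2):
--                 answer.append(tmp_val[i][0])
--
--     return answer
-- ===== SOURCE B (Python) =====
-- def solution(genres, plays):
--     # One global sort + one capped scan instead of a per-genre sort inside the genre loop.
--     totals = {}
--     for i, g in enumerate(genres):
--         totals[g] = totals.get(g, 0) + plays[i]
--     # dict order = first-appearance order; stable sort by -total reproduces most_common()'s tie order
--     order = sorted(totals, key=lambda g: -totals[g])
--     rank = {g: r for r, g in enumerate(order)}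
--     by_plays = sorted(range(len(genres)), key=lambda i: (-plays[i], i))
--     songs = sorted(by_plays, key=lambda i: rank[genres[i]])
--     answer = []
--     taken = {}
--     for i in songs:
--         g = genres[i]
--         c = taken.get(g, 0)
--         if c < 2:
--             answer.append(i)
--             taken[g] = c + 1
--     return answer
-- ===== Notes on version B (the rewrite author's own statement) =====
-- stated objective: alternative
-- what changed: B replaces A's per-genre sort inside the genre loop by one global sort of all song indices (stable, keyed by genre rank then plays) followed by a single scan that takes at most two songs per genre; genre order comes from one stable sort of the totals dict instead of Counter.most_common().
import Mathlib
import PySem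

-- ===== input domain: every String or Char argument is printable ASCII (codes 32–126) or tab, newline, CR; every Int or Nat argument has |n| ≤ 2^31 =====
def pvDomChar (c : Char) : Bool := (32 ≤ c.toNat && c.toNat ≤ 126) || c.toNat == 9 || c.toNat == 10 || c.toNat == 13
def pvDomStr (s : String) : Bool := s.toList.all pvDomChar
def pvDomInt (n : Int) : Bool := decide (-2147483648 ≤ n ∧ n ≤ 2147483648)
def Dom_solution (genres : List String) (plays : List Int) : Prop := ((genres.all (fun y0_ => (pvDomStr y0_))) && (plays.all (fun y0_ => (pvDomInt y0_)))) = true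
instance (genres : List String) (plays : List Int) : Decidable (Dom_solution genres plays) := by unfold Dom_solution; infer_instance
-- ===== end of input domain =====

-- B replaces A's per-genre sorts inside the genre loop by one global stable sort of all
-- song indices plus a single capped scan; equal return values proved on Pre_ (genres no
-- longer than plays).

-- ===== PORT A =====
def solution (genres : List String) (plays : List Int) : List Int :=
  let st := (PySem.List.enumerate genres 0).foldl
    (fun (st : PySem.Dict String Int × PySem.Dict String (List (Int × Int))) p =>
      (st.1.modify p.2 0 (fun v => v + PySem.List.pyGetD plays p.1 0),
       st.2.modify p.2 [] (fun l => l ++ [(p.1, PySem.List.pyGetD plays p.1 0)])))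
    (PySem.Dict.empty, PySem.Dict.empty)
  let genre_dict := st.1
  let music_num := st.2
  -- Counter(genre_dict).most_common() = items sorted by count, descending, stable
  let most_genre := PySem.List.sorted genre_dict.items (fun kv => kv.2) true
  most_genre.foldl (fun answer kv =>
    let tmp_val := PySem.List.sorted2 (music_num.getD kv.1 []) (fun x => -x.2) (fun x => x.1) false
    if tmp_val.length = 1 then
      answer ++ [(PySem.List.pyGetD tmp_val 0 (0, 0)).1]
    else
      (PySem.List.pyRange 0 2 1).foldl
        (fun a i => a ++ [(PySem.List.pyGetD tmp_val i (0, 0)).1]) answer)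
    []

-- ===== PORT B =====
def solution_alt (genres : List String) (plays : List Int) : List Int :=
  let totals := (PySem.List.enumerate genres 0).foldl
    (fun (d : PySem.Dict String Int) p =>
      d.insert p.2 (d.getD p.2 0 + PySem.List.pyGetD plays p.1 0))
    PySem.Dict.empty
  let order := PySem.List.sorted totals.keys (fun g => -(totals.getD g 0)) false
  let rank := (PySem.List.enumerate order 0).foldl
    (fun (d : PySem.Dict String Int) p => d.insert p.2 p.1) PySem.Dict.empty
  let by_plays := PySem.List.sorted2 (PySem.List.pyRange 0 (genres.length : Int) 1)
    (fun i => -(PySem.List.pyGetD plays i 0)) (fun i => i) false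
  let songs := PySem.List.sorted by_plays
    (fun i => rank.getD (PySem.List.pyGetD genres i "") 0) false
  let st := songs.foldl (fun (st : List Int × PySem.Dict String Int) i =>
      let g := PySem.List.pyGetD genres i ""
      let c := st.2.getD g 0
      if c < 2 then (st.1 ++ [i], st.2.insert g (c + 1)) else st)
    ([], PySem.Dict.empty)
  st.1

-- ===== PRECONDITION & SPEC =====
-- Pre_: plays[index] is read for every index below len(genres); a shorter plays raises IndexError in A.
def Pre_solution (genres : List String) (plays : List Int) : Prop := genres.length ≤ plays.length
instance (genres : List String) (plays : List Int) : Decidable (Pre_solution genres plays) := by unfold Pre_solution; infer_instance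
def pvWitness_solution : List String × List Int := (["pop", "rock", "pop"], [10, 20, 10])

def Spec_solution (genres : List String) (plays : List Int) (out : List Int) : Prop := out = solution_alt genres plays
instance (genres : List String) (plays : List Int) (out : List Int) : Decidable (Spec_solution genres plays out) := by unfold Spec_solution; infer_instance

-- ===== CLAIM (what is proved, stated in full; the proofs are below) =====
def Claim_equal_solution : Prop := ∀ (genres : List String) (plays : List Int), Dom_solution genres plays → Pre_solution genres plays → Spec_solution genres plays (solution genres plays)

-- ===== LEMMAS AND PROOFS =====

-- ===== proof-side abbreviations =====
def pvP (plays : List Int) (i : Int) : Int := PySem.List.pyGetD plays i 0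
def pvG (genres : List String) (i : Int) : String := PySem.List.pyGetD genres i ""
def pvR (genres : List String) : List Int := PySem.List.pyRange 0 (genres.length : Int) 1
def pvPairs (genres : List String) : List (Int × String) := PySem.List.enumerate genres 0
def pvTot (genres : List String) (plays : List Int) (g : String) : Int :=
  (((pvPairs genres).filter (fun p => p.2 == g)).map (fun p => pvP plays p.1)).sum
def pvDictT (genres : List String) (plays : List Int) : PySem.Dict String Int :=
  (pvPairs genres).foldl (fun d p => d.insert p.2 (d.getD p.2 0 + pvP plays p.1)) PySem.Dict.empty
def pvOrd (genres : List String) (plays : List Int) : List String :=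
  PySem.List.sorted (pvDictT genres plays).keys (fun g => -((pvDictT genres plays).getD g 0)) false
def pvKey (plays : List Int) (i : Int) : Lex (Int × Int) := toLex (-(pvP plays i), i)
def pvInner (genres : List String) (plays : List Int) : List Int :=
  PySem.List.sorted2 (pvR genres) (fun i => -(pvP plays i)) (fun i => i) false
def pvS (genres : List String) (plays : List Int) (g : String) : List Int :=
  (pvInner genres plays).filter (fun i => pvG genres i == g)

-- ===== generic lemmas =====
theorem pv_insertBy_skip {α : Type} (b : α → α → Bool) (x : α) (ys zs : List α)
    (h : ∀ y ∈ ys, b x y = false) :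
    PySem.List.insertBy b x (ys ++ zs) = ys ++ PySem.List.insertBy b x zs := by
  induction ys with
  | nil => simp
  | cons y t ih =>
    have hy : b x y = false := h y (List.mem_cons_self ..)
    simp [PySem.List.insertBy, hy, ih (fun y hy' => h y (List.mem_cons_of_mem _ hy'))]

theorem pv_insertBy_front {α : Type} (b : α → α → Bool) (x : α) (zs : List α)
    (h : ∀ y ∈ zs, b x y = true) :
    PySem.List.insertBy b x zs = x :: zs := by
  cases zs with
  | nil => rfl
  | cons y t => simp [PySem.List.insertBy, h y (List.mem_cons_self ..)]

theorem pv_insertBy_map {α β : Type} (h : α → β) (b1 : β → β → Bool) (b2 : α → α → Bool)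
    (x : α) (ys : List α) (hb : ∀ y, b1 (h x) (h y) = b2 x y) :
    PySem.List.insertBy b1 (h x) (ys.map h) = (PySem.List.insertBy b2 x ys).map h := by
  induction ys with
  | nil => rfl
  | cons y t ih =>
    by_cases hxy : b2 x y = true
    · simp [PySem.List.insertBy, hb y, hxy]
    · simp only [Bool.not_eq_true] at hxy
      simp [PySem.List.insertBy, hb y, hxy, ih]

theorem pv_foldl_insertBy_map {α β : Type} (h : α → β) (b1 : β → β → Bool) (b2 : α → α → Bool)
    (hb : ∀ x y, b1 (h x) (h y) = b2 x y) :
    ∀ (Ds acc : List α),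
      (Ds.map h).foldl (fun a x => PySem.List.insertBy b1 x a) (acc.map h)
        = (Ds.foldl (fun a x => PySem.List.insertBy b2 x a) acc).map h := by
  intro Ds
  induction Ds with
  | nil => intro acc; rfl
  | cons g t ih =>
    intro acc
    simp only [List.map_cons, List.foldl_cons]
    rw [pv_insertBy_map h b1 b2 g acc (hb g)]
    exact ih _

theorem pv_insert_grouped {γ : Type} [DecidableEq γ] (rkf : γ → Int) (gOf : Int → γ) :
    ∀ (os : List γ), os.Pairwise (fun a b => rkf a < rkf b) →
    ∀ (F : γ → List Int) (x : Int), (∀ g ∈ os, ∀ y ∈ F g, gOf y = g) → gOf x ∈ os →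
    PySem.List.insertBy (fun a b => decide (rkf (gOf a) < rkf (gOf b))) x (os.flatMap F)
      = os.flatMap (fun g => F g ++ if gOf x = g then [x] else []) := by
  intro os
  induction os with
  | nil => intro _ F x _ hx; exact absurd hx (List.not_mem_nil)
  | cons g rest ih =>
    intro hp F x hF hx
    have hg : ∀ b ∈ rest, rkf g < rkf b := (List.pairwise_cons.1 hp).1
    have hrest := (List.pairwise_cons.1 hp).2
    simp only [List.flatMap_cons]
    by_cases hxg : gOf x = g
    · have hskip : ∀ y ∈ F g, (fun a b => decide (rkf (gOf a) < rkf (gOf b))) x y = false := by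
        intro y hy
        have := hF g (List.mem_cons_self ..) y hy
        simp [this, hxg]
      rw [pv_insertBy_skip _ _ _ _ hskip]
      have hfront : ∀ y ∈ rest.flatMap F, (fun a b => decide (rkf (gOf a) < rkf (gOf b))) x y = true := by
        intro y hy
        obtain ⟨g', hg', hyF⟩ := List.mem_flatMap.1 hy
        have := hF g' (List.mem_cons_of_mem _ hg') y hyF
        simp [this, hxg, hg g' hg']
      rw [pv_insertBy_front _ _ _ hfront]
      have hrest_eq : rest.flatMap (fun g' => F g' ++ if gOf x = g' then [x] else []) = rest.flatMap F := by
        apply List.flatMap_congr ?_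
        intro g' hg'
        have : gOf x ≠ g' := by
          intro hcon
          exact absurd (hg g' hg') (by rw [← hcon, hxg]; exact lt_irrefl _)
        simp [this]
      rw [hrest_eq, if_pos hxg]
      simp
    · have hx' : gOf x ∈ rest := by
        rcases List.mem_cons.1 hx with h | h
        · exact absurd h hxg
        · exact h
      have hskip : ∀ y ∈ F g, (fun a b => decide (rkf (gOf a) < rkf (gOf b))) x y = false := by
        intro y hy
        have hyg := hF g (List.mem_cons_self ..) y hy
        have := hg _ hx'
        simp only [hyg, decide_eq_false_iff_not, not_lt]
        exact le_of_lt this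
      rw [pv_insertBy_skip _ _ _ _ hskip]
      rw [ih hrest F x (fun g' hg' => hF g' (List.mem_cons_of_mem _ hg')) hx']
      rw [if_neg hxg]
      simp

theorem pv_group_sorted {γ : Type} [DecidableEq γ] (rkf : γ → Int) (gOf : Int → γ) (os : List γ)
    (hp : os.Pairwise (fun a b => rkf a < rkf b)) :
    ∀ (l : List Int), (∀ i ∈ l, gOf i ∈ os) →
    PySem.List.sorted l (fun i => rkf (gOf i)) false
      = os.flatMap (fun g => l.filter (fun i => decide (gOf i = g))) := by
  intro l
  induction l using List.reverseRecOn with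
  | nil => intro _; simp [PySem.List.sorted]
  | append_singleton t x ih =>
    intro hmem
    rw [PySem.List.sorted_eq_foldl_insertBy, List.foldl_append]
    rw [← PySem.List.sorted_eq_foldl_insertBy]
    rw [ih (fun i hi => hmem i (List.mem_append_left _ hi))]
    simp only [List.foldl_cons, List.foldl_nil]
    rw [pv_insert_grouped rkf gOf os hp _ x
      (fun g _ y hy => by simpa using List.of_mem_filter hy)
      (hmem x (List.mem_append_right _ (List.mem_cons_self ..)))]
    apply List.flatMap_congr
    intro g _
    rw [List.filter_append]
    congr 1
    by_cases h : gOf x = g <;> simp [h]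

theorem pv_scan_group {γ : Type} [BEq γ] [LawfulBEq γ] [DecidableEq γ] (gOf : Int → γ) (g : γ) :
    ∀ (xs : List Int), (∀ i ∈ xs, gOf i = g) → ∀ (ans : List Int) (d : PySem.Dict γ Int),
    0 ≤ d.getD g 0 →
    (xs.foldl (fun (st : List Int × PySem.Dict γ Int) i =>
        let gg := gOf i
        let c := st.2.getD gg 0
        if c < 2 then (st.1 ++ [i], st.2.insert gg (c + 1)) else st) (ans, d)).1
        = ans ++ xs.take (2 - d.getD g 0).toNat
      ∧ ∀ g', g' ≠ g →
        (xs.foldl (fun (st : List Int × PySem.Dict γ Int) i =>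
          let gg := gOf i
          let c := st.2.getD gg 0
          if c < 2 then (st.1 ++ [i], st.2.insert gg (c + 1)) else st) (ans, d)).2.getD g' 0
          = d.getD g' 0 := by
  intro xs
  induction xs with
  | nil => intro _ ans d _; simp
  | cons i t ih =>
    intro hall ans d hc
    have hig : gOf i = g := hall i (List.mem_cons_self ..)
    simp only [List.foldl_cons, hig]
    by_cases h2 : d.getD g 0 < 2
    · rw [if_pos h2]
      have ih' := ih (fun j hj => hall j (List.mem_cons_of_mem _ hj)) (ans ++ [i])
        (d.insert g (d.getD g 0 + 1))
        (by rw [PySem.Dict.getD_insert]; simp; omega)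
      rw [PySem.Dict.getD_insert] at ih'
      constructor
      · rw [ih'.1]
        have : (2 - d.getD g 0).toNat = ((2 - (d.getD g 0 + 1)).toNat) + 1 := by omega
        rw [this, List.take_succ_cons]
        simp
      · intro g' hg'
        rw [ih'.2 g' hg', PySem.Dict.getD_insert, if_neg hg']
    · rw [if_neg h2]
      have ih' := ih (fun j hj => hall j (List.mem_cons_of_mem _ hj)) ans d hc
      constructor
      · rw [ih'.1]
        have : (2 - d.getD g 0).toNat = 0 := by omega
        rw [this]
        simp
      · exact ih'.2

theorem pv_scan_groups {γ : Type} [BEq γ] [LawfulBEq γ] [DecidableEq γ] (gOf : Int → γ) :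
    ∀ (os : List γ), os.Nodup → ∀ (F : γ → List Int),
    (∀ g ∈ os, ∀ y ∈ F g, gOf y = g) → ∀ (ans : List Int) (d : PySem.Dict γ Int),
    (∀ g ∈ os, d.getD g 0 = 0) →
    ((os.flatMap F).foldl (fun (st : List Int × PySem.Dict γ Int) i =>
        let gg := gOf i
        let c := st.2.getD gg 0
        if c < 2 then (st.1 ++ [i], st.2.insert gg (c + 1)) else st) (ans, d)).1
      = ans ++ os.flatMap (fun g => (F g).take 2) := by
  intro os
  induction os with
  | nil => intro _ F _ ans d _; simp
  | cons g rest ih =>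
    intro hnd F hF ans d hd
    have hg0 : d.getD g 0 = 0 := hd g (List.mem_cons_self ..)
    simp only [List.flatMap_cons, List.foldl_append]
    have hgrp := pv_scan_group gOf g (F g) (hF g (List.mem_cons_self ..)) ans d (by rw [hg0])
    obtain ⟨e1, e2⟩ := hgrp
    set st1 := (F g).foldl (fun (st : List Int × PySem.Dict γ Int) i =>
        let gg := gOf i
        let c := st.2.getD gg 0
        if c < 2 then (st.1 ++ [i], st.2.insert gg (c + 1)) else st) (ans, d) with hst1
    have hrec := ih hnd.of_cons F (fun g' hg' => hF g' (List.mem_cons_of_mem _ hg')) st1.1 st1.2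
      (by
        intro g' hg'
        have hne : g' ≠ g := by
          intro hcon; subst hcon; exact (List.nodup_cons.1 hnd).1 hg'
        rw [e2 g' hne]; exact hd g' (List.mem_cons_of_mem _ hg'))
    rw [hrec, e1, hg0]
    simp

-- totals dict: value at any genre, keys
theorem pv_dictT_getD (plays : List Int) :
    ∀ (l : List (Int × String)) (d : PySem.Dict String Int) (c : String),
    (l.foldl (fun d p => d.insert p.2 (d.getD p.2 0 + pvP plays p.1)) d).getD c 0
      = d.getD c 0 + ((l.filter (fun p => p.2 == c)).map (fun p => pvP plays p.1)).sum := by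
  intro l
  induction l with
  | nil => intro d c; simp
  | cons p t ih =>
    intro d c
    simp only [List.foldl_cons, List.filter_cons]
    rw [ih]
    rw [PySem.Dict.getD_insert]
    by_cases h : c = p.2
    · simp [h]
      ring
    · have h' : (p.2 == c) = false := by simp [beq_eq_false_iff_ne]; exact fun hc => h hc.symm
      simp [h, h']

theorem pv_dictT_getD' (genres : List String) (plays : List Int) (g : String) :
    (pvDictT genres plays).getD g 0 = pvTot genres plays g := by
  unfold pvDictT pvTot
  rw [pv_dictT_getD plays]
  simp

theorem pv_dictT_keys (genres : List String) (plays : List Int) :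
    (pvDictT genres plays).keys = PySem.Set.ofList genres := by
  unfold pvDictT
  rw [PySem.Dict.keys_foldl_insert_key (pvPairs genres) (fun p => p.2)
    (fun d p => d.getD p.2 0 + pvP plays p.1) PySem.Dict.empty]
  rw [pvPairs, PySem.List.map_snd_enumerate]
  rfl

theorem pv_dictT_nodup (genres : List String) (plays : List Int) :
    (pvDictT genres plays).keys.Nodup := by
  rw [pv_dictT_keys]; exact PySem.Set.nodup_ofList genres

theorem pv_dictT_items (genres : List String) (plays : List Int) :
    (pvDictT genres plays).items
      = (PySem.Set.ofList genres).map (fun g => (g, pvTot genres plays g)) := by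
  rw [PySem.Dict.items_eq_map_keys _ (pv_dictT_nodup genres plays) 0]
  rw [pv_dictT_keys]
  exact List.map_congr_left (fun g _ => by rw [pv_dictT_getD'])

-- rank dict lookup
theorem pv_getD_foldl_insert_ne {κ ν β : Type} [BEq κ] [LawfulBEq κ] [DecidableEq κ]
    (k : β → κ) (v : β → ν) (c : κ) (d0 : ν) :
    ∀ (l : List β) (d : PySem.Dict κ ν), (∀ p ∈ l, k p ≠ c) →
    (l.foldl (fun d p => d.insert (k p) (v p)) d).getD c d0 = d.getD c d0 := by
  intro l
  induction l with
  | nil => intro d _; rfl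
  | cons p t ih =>
    intro d h
    simp only [List.foldl_cons]
    rw [ih _ (fun q hq => h q (List.mem_cons_of_mem _ hq))]
    rw [PySem.Dict.getD_insert, if_neg (fun hc => h p (List.mem_cons_self ..) hc.symm)]

theorem pv_rank_getD :
    ∀ (os : List String) (s : Int) (d : PySem.Dict String Int), os.Nodup →
    ∀ (j : Nat) (hj : j < os.length),
    ((PySem.List.enumerate os s).foldl (fun d p => d.insert p.2 p.1) d).getD os[j] 0 = s + j := by
  intro os
  induction os with
  | nil => intro _ _ _ j hj; simp at hj
  | cons g t ih =>
    intro s d hnd j hj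
    rw [PySem.List.enumerate_cons]
    simp only [List.foldl_cons]
    cases j with
    | zero =>
      simp only [List.getElem_cons_zero]
      have : ∀ p ∈ PySem.List.enumerate t (s + 1), (p : Int × String).2 ≠ g := by
        intro p hp
        obtain ⟨k, hk, rfl⟩ := (PySem.List.mem_enumerate_iff ..).1 hp
        intro hcon
        exact (List.nodup_cons.1 hnd).1 (hcon ▸ List.getElem_mem hk)
      have := pv_getD_foldl_insert_ne (fun p : Int × String => p.2) (fun p => p.1) g 0
        (PySem.List.enumerate t (s + 1)) (d.insert g s) this
      rw [this, PySem.Dict.getD_insert, if_pos rfl]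
      simp
    | succ j' =>
      simp only [List.getElem_cons_succ]
      rw [ih (s + 1) _ (List.nodup_cons.1 hnd).2 j' (by simpa using hj)]
      push_cast
      ring

-- sorted2 with Int keys is sorted with the lexicographic pair key
theorem pv_sorted2_eq_sorted_lex {α : Type} (xs : List α) (k1 k2 : α → Int) :
    PySem.List.sorted2 xs k1 k2 false
      = PySem.List.sorted xs (fun a => toLex (k1 a, k2 a)) false := by
  show xs.foldl (fun acc x => PySem.List.insertBy _ x acc) []
      = xs.foldl (fun acc x => PySem.List.insertBy _ x acc) []
  have hb : (fun (a b : α) => decide (k1 a < k1 b) || (!decide (k1 b < k1 a) && decide (k2 a < k2 b)))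
      = (fun (a b : α) => decide (toLex (k1 a, k2 a) < toLex (k1 b, k2 b))) := by
    funext a b
    rcases lt_trichotomy (k1 a) (k1 b) with h | h | h
    · simp [h, Prod.Lex.lt_iff, not_lt.2 (le_of_lt h)]
    · simp [h, Prod.Lex.lt_iff]
    · simp [not_lt.2 (le_of_lt h), h, Prod.Lex.lt_iff, ne_of_gt h]
  simp only [hb]
  rfl

theorem pv_inner_eq (genres : List String) (plays : List Int) :
    pvInner genres plays = PySem.List.sorted (pvR genres) (pvKey plays) false := by
  unfold pvInner pvKey
  exact pv_sorted2_eq_sorted_lex (pvR genres) _ _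

theorem pv_key_inj (plays : List Int) : Function.Injective (pvKey plays) := by
  intro i j h
  unfold pvKey at h
  have := congrArg (fun x => (ofLex x).2) h
  simpa using this

theorem pv_inner_pairwise (genres : List String) (plays : List Int) :
    (pvInner genres plays).Pairwise (fun i j => pvKey plays i < pvKey plays j) := by
  rw [pv_inner_eq]
  have hle := PySem.List.sorted_pairwise (pvR genres) (pvKey plays)
  have hnd : (PySem.List.sorted (pvR genres) (pvKey plays) false).Nodup :=
    (PySem.List.sorted_perm (pvR genres) (pvKey plays) false).nodup_iff.2
      (PySem.List.nodup_pyRange_one 0 (genres.length : Int))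
  have := hle.and (List.nodup_iff_pairwise_ne.1 hnd)
  exact this.imp (fun ⟨h1, h2⟩ => lt_of_le_of_ne h1 (fun hk => h2 (pv_key_inj plays hk)))

theorem pv_pairs_eq (genres : List String) :
    pvPairs genres = (pvR genres).map (fun j => (j, pvG genres j)) := by
  unfold pvPairs pvR pvG
  have := PySem.List.enumerate_eq_map_pyRange genres ""
  simpa [PySem.List.len] using this

theorem pv_Lg (genres : List String) (plays : List Int) (g : String) :
    ((pvPairs genres).filter (fun p => p.2 == g)).map (fun p => (p.1, pvP plays p.1))
      = ((pvR genres).filter (fun i => pvG genres i == g)).map (fun i => (i, pvP plays i)) := by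
  rw [pv_pairs_eq, List.filter_map, List.map_map]
  rfl

theorem pv_S_perm (genres : List String) (plays : List Int) (g : String) :
    (pvS genres plays g).Perm ((pvR genres).filter (fun i => pvG genres i == g)) := by
  unfold pvS pvInner
  exact ((PySem.List.sorted2_perm ..).filter _)

theorem pv_tmp (genres : List String) (plays : List Int) (g : String) :
    PySem.List.sorted2
        (((pvPairs genres).filter (fun p => p.2 == g)).map (fun p => (p.1, pvP plays p.1)))
        (fun x => -x.2) (fun x => x.1) false
      = (pvS genres plays g).map (fun i => (i, pvP plays i)) := by
  rw [pv_sorted2_eq_sorted_lex, pv_Lg]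
  apply PySem.List.sorted_eq_of_perm_of_pairwise_lt
  · exact (pv_S_perm genres plays g).map _
  · rw [List.pairwise_map]
    have hsub : (pvS genres plays g).Sublist (pvInner genres plays) := List.filter_sublist
    have := List.Pairwise.sublist hsub (pv_inner_pairwise genres plays)
    exact this.imp (fun {i j} h => h)

theorem pv_mem_ord (genres : List String) (plays : List Int) (g : String) :
    g ∈ pvOrd genres plays ↔ g ∈ genres := by
  unfold pvOrd
  rw [PySem.List.mem_sorted, pv_dictT_keys, PySem.Set.mem_ofList]

theorem pv_S_ne_nil (genres : List String) (plays : List Int) (g : String)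
    (hg : g ∈ pvOrd genres plays) : pvS genres plays g ≠ [] := by
  have hg' : g ∈ genres := (pv_mem_ord genres plays g).1 hg
  obtain ⟨n, hn, rfl⟩ := List.mem_iff_getElem.1 hg'
  intro hnil
  have hiR : (n : Int) ∈ pvR genres := by
    rw [pvR, PySem.List.mem_pyRange_one]
    constructor
    · positivity
    · exact_mod_cast hn
  have hiI : (n : Int) ∈ pvInner genres plays := by
    unfold pvInner
    have := PySem.List.sorted2_perm (pvR genres)
      (fun i => -(pvP plays i)) (fun i => i) false
    exact (this.mem_iff).2 hiR
  have hgi : pvG genres (n : Int) = genres[n] := by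
    unfold pvG
    rw [PySem.List.pyGetD_eq_getElem _ _ (by positivity) (by exact_mod_cast hn)]
    simp
  have : (n : Int) ∈ pvS genres plays genres[n] := by
    unfold pvS
    rw [List.mem_filter]
    exact ⟨hiI, by simp [hgi]⟩
  rw [hnil] at this
  exact absurd this (List.not_mem_nil)

theorem pv_most_genre (genres : List String) (plays : List Int) :
    PySem.List.sorted (pvDictT genres plays).items (fun kv => kv.2) true
      = (pvOrd genres plays).map (fun g => (g, pvTot genres plays g)) := by
  rw [pv_dictT_items, PySem.List.sorted_rev_eq_foldl_insertBy]
  unfold pvOrd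
  rw [PySem.List.sorted_eq_foldl_insertBy, pv_dictT_keys]
  have hb : ∀ x y : String,
      (fun (a b : String × Int) => decide (((fun kv : String × Int => kv.2) b) < ((fun kv : String × Int => kv.2) a)))
        ((fun g => (g, pvTot genres plays g)) x) ((fun g => (g, pvTot genres plays g)) y)
      = (fun (a b : String) => decide ((fun g => -((pvDictT genres plays).getD g 0)) a
          < (fun g => -((pvDictT genres plays).getD g 0)) b)) x y := by
    intro x y
    simp only [pv_dictT_getD']
    exact decide_eq_decide.2 (by constructor <;> intro h <;> omega)
  have := pv_foldl_insertBy_map (fun g => (g, pvTot genres plays g))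
    (fun (a b : String × Int) => decide (b.2 < a.2))
    (fun (a b : String) => decide (-((pvDictT genres plays).getD a 0)
        < -((pvDictT genres plays).getD b 0))) hb
    (PySem.Set.ofList genres) []
  simpa using this

theorem pv_music_getD (genres : List String) (plays : List Int) (g : String) :
    ((pvPairs genres).foldl
        (fun (d : PySem.Dict String (List (Int × Int))) p =>
          d.modify p.2 [] (fun l => l ++ [(p.1, pvP plays p.1)])) PySem.Dict.empty).getD g []
      = ((pvPairs genres).filter (fun p => p.2 == g)).map (fun p => (p.1, pvP plays p.1)) := by
  have h1 : (pvPairs genres).foldl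
        (fun (d : PySem.Dict String (List (Int × Int))) p =>
          d.modify p.2 [] (fun l => l ++ [(p.1, pvP plays p.1)])) PySem.Dict.empty
      = ((pvPairs genres).map (fun p => (p.2, (p.1, pvP plays p.1)))).foldl
        (fun (d : PySem.Dict String (List (Int × Int))) q =>
          d.modify q.1 [] (fun l => l ++ [q.2])) PySem.Dict.empty :=
    (List.foldl_map (f := fun p : Int × String => (p.2, (p.1, pvP plays p.1)))
      (g := fun (d : PySem.Dict String (List (Int × Int))) q => d.modify q.1 [] (fun l => l ++ [q.2]))
      (l := pvPairs genres) (init := PySem.Dict.empty)).symm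
  rw [h1, PySem.Dict.getD_foldl_modify_append]
  rw [List.filter_map, List.map_map]
  simp [Function.comp_def]

theorem pv_range2 : PySem.List.pyRange 0 2 1 = [0, 1] := by decide

theorem pv_body (genres : List String) (plays : List Int) (g : String)
    (hg : g ∈ pvOrd genres plays) (answer : List Int) :
    (let tmp_val := (pvS genres plays g).map (fun i => (i, pvP plays i))
     if tmp_val.length = 1 then answer ++ [(PySem.List.pyGetD tmp_val 0 (0, 0)).1]
     else (PySem.List.pyRange 0 2 1).foldl
       (fun a i => a ++ [(PySem.List.pyGetD tmp_val i (0, 0)).1]) answer)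
    = answer ++ (pvS genres plays g).take 2 := by
  match hS : pvS genres plays g with
  | [] => exact absurd hS (pv_S_ne_nil genres plays g hg)
  | [j] =>
    simp [PySem.List.pyGetD_zero_cons]
  | j0 :: j1 :: rest =>
    simp only [pv_range2, List.foldl_cons, List.foldl_nil, List.map_cons]
    rw [if_neg (by simp : ¬ ((j0, pvP plays j0) :: (j1, pvP plays j1)
      :: (rest.map (fun i => (i, pvP plays i)))).length = 1)]
    rw [PySem.List.pyGetD_zero_cons]
    rw [PySem.List.pyGetD_ofNat' _ 1 _]
    simp

theorem pv_ord_nodup (genres : List String) (plays : List Int) : (pvOrd genres plays).Nodup := by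
  unfold pvOrd
  exact ((PySem.List.sorted_perm ..).nodup_iff).2 (pv_dictT_nodup genres plays)

theorem pv_mem_inner_ord (genres : List String) (plays : List Int) (i : Int)
    (hi : i ∈ pvInner genres plays) : pvG genres i ∈ pvOrd genres plays := by
  have hiR : i ∈ pvR genres := by
    unfold pvInner at hi
    exact (PySem.List.sorted2_perm ..).mem_iff.1 hi
  rw [pvR, PySem.List.mem_pyRange_one] at hiR
  rw [pv_mem_ord]
  unfold pvG
  rw [PySem.List.pyGetD_eq_getElem _ _ hiR.1 (by exact_mod_cast hiR.2)]
  exact List.getElem_mem _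

set_option maxHeartbeats 1600000 in
theorem pv_songs (genres : List String) (plays : List Int) :
    PySem.List.sorted (pvInner genres plays)
      (fun i => ((PySem.List.enumerate (pvOrd genres plays) 0).foldl
        (fun (d : PySem.Dict String Int) p => d.insert p.2 p.1) PySem.Dict.empty).getD
          (pvG genres i) 0) false
      = (pvOrd genres plays).flatMap (pvS genres plays) := by
  have hp : (pvOrd genres plays).Pairwise (fun a b =>
      ((PySem.List.enumerate (pvOrd genres plays) 0).foldl
        (fun (d : PySem.Dict String Int) p => d.insert p.2 p.1) PySem.Dict.empty).getD a 0
      < ((PySem.List.enumerate (pvOrd genres plays) 0).foldl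
        (fun (d : PySem.Dict String Int) p => d.insert p.2 p.1) PySem.Dict.empty).getD b 0) := by
    rw [List.pairwise_iff_getElem]
    intro i j hi hj hij
    rw [pv_rank_getD _ 0 _ (pv_ord_nodup genres plays) i hi,
        pv_rank_getD _ 0 _ (pv_ord_nodup genres plays) j hj]
    simpa using (by exact_mod_cast hij : (i : Int) < j)
  have h := pv_group_sorted
    (fun g => ((PySem.List.enumerate (pvOrd genres plays) 0).foldl
      (fun (d : PySem.Dict String Int) p => d.insert p.2 p.1) PySem.Dict.empty).getD g 0)
    (pvG genres) (pvOrd genres plays) hp (pvInner genres plays)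
    (fun i hi => pv_mem_inner_ord genres plays i hi)
  refine h.trans (List.flatMap_congr fun g _ => ?_)
  unfold pvS
  exact List.filter_congr fun i _ => (Bool.beq_eq_decide_eq (pvG genres i) g).symm

set_option maxHeartbeats 2000000 in
theorem pv_B_eq (genres : List String) (plays : List Int) :
    solution_alt genres plays
      = (pvOrd genres plays).flatMap (fun g => (pvS genres plays g).take 2) := by
  show ((PySem.List.sorted (pvInner genres plays)
      (fun i => ((PySem.List.enumerate (pvOrd genres plays) 0).foldl
        (fun (d : PySem.Dict String Int) p => d.insert p.2 p.1) PySem.Dict.empty).getD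
          (pvG genres i) 0) false).foldl
      (fun (st : List Int × PySem.Dict String Int) i =>
        let gg := pvG genres i
        let c := st.2.getD gg 0
        if c < 2 then (st.1 ++ [i], st.2.insert gg (c + 1)) else st)
      ([], PySem.Dict.empty)).1 = _
  rw [pv_songs genres plays]
  have hF : ∀ g ∈ pvOrd genres plays, ∀ y ∈ pvS genres plays g, pvG genres y = g := by
    intro g _ y hy
    have := List.of_mem_filter hy
    simpa using this
  have h := pv_scan_groups (pvG genres) (pvOrd genres plays) (pv_ord_nodup genres plays)
    (pvS genres plays) hF [] PySem.Dict.empty (by intro g _; exact PySem.Dict.getD_empty g 0)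
  rw [List.nil_append] at h
  exact h

set_option maxHeartbeats 2000000 in
theorem pv_A_eq (genres : List String) (plays : List Int) :
    solution genres plays
      = (pvOrd genres plays).flatMap (fun g => (pvS genres plays g).take 2) := by
  show (PySem.List.sorted
      ((pvPairs genres).foldl
        (fun (st : PySem.Dict String Int × PySem.Dict String (List (Int × Int))) p =>
          (st.1.modify p.2 0 (fun v => v + pvP plays p.1),
           st.2.modify p.2 [] (fun l => l ++ [(p.1, pvP plays p.1)])))
        (PySem.Dict.empty, PySem.Dict.empty)).1.items (fun kv => kv.2) true).foldl
      (fun answer kv =>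
        let tmp_val := PySem.List.sorted2
          (((pvPairs genres).foldl
            (fun (st : PySem.Dict String Int × PySem.Dict String (List (Int × Int))) p =>
              (st.1.modify p.2 0 (fun v => v + pvP plays p.1),
               st.2.modify p.2 [] (fun l => l ++ [(p.1, pvP plays p.1)])))
            (PySem.Dict.empty, PySem.Dict.empty)).2.getD kv.1 [])
          (fun x => -x.2) (fun x => x.1) false
        if tmp_val.length = 1 then
          answer ++ [(PySem.List.pyGetD tmp_val 0 (0, 0)).1]
        else
          (PySem.List.pyRange 0 2 1).foldl
            (fun a i => a ++ [(PySem.List.pyGetD tmp_val i (0, 0)).1]) answer)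
      [] = _
  rw [PySem.List.foldl_prod_mk
    (f := fun (d : PySem.Dict String Int) (p : Int × String) =>
      d.modify p.2 0 (fun v => v + pvP plays p.1))
    (g := fun (d : PySem.Dict String (List (Int × Int))) (p : Int × String) =>
      d.modify p.2 [] (fun l => l ++ [(p.1, pvP plays p.1)]))]
  have hgd : (pvPairs genres).foldl
      (fun (d : PySem.Dict String Int) (p : Int × String) =>
        d.modify p.2 0 (fun v => v + pvP plays p.1)) PySem.Dict.empty
      = pvDictT genres plays := rfl
  simp only [hgd]
  rw [pv_most_genre genres plays]
  rw [List.foldl_map]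
  rw [PySem.List.foldl_congr_mem _ _ (fun ans g => ans ++ (pvS genres plays g).take 2) _
    (by
      intro acc g hg
      simp only []
      rw [pv_music_getD genres plays, pv_tmp genres plays]
      exact pv_body genres plays g hg acc)]
  rw [PySem.List.foldl_append_eq_flatMap (fun g => (pvS genres plays g).take 2)]
  simp

theorem pv_main (genres : List String) (plays : List Int) :
    solution genres plays = solution_alt genres plays :=
  (pv_A_eq genres plays).trans (pv_B_eq genres plays).symm

-- ===== VERDICT (by name: the statement is the Claim_ definition above) =====
theorem solution_spec : Claim_equal_solution := by
  intro genres plays _ _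
  exact pv_main genres plays
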